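-- pv_equiv track=rewrite | github.com/vgnshiyer/Data-Structures-and-Algorithm-Solutions | CTCI/Chapter 8 Recursion and Dynamic programming/RobotGrid.py | findPathBottomUp
-- ===== SOURCE A (Python) =====
-- def findPathBottomUp(grid: list) -> int:
--     r, c = len(grid), len(grid[0])
--     dp = [[0]*(c) for i in range(r)]
--
--     for i in range(r): dp[i][0] = i+1
--     for j in range(c): dp[0][j] = j+1
--
--     for i in range(1, r):
--         for j in range(1, c):
--             dp[i][j] = 1 + min(dp[i-1][j], dp[i][j-1])
--     return dp[r-1][c-1]
-- ===== SOURCE B (Python) =====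
-- def findPathBottomUp(grid: list) -> int:
--     # The DP never reads the grid cells and solves to dp[i][j] = i + j + 1,
--     # so the answer is the last entry of the first dp row plus (r - 1).
--     r, c = len(grid), len(grid[0])
--     first_row = [j + 1 for j in range(c)]
--     return (r - 1) + first_row[-1]
-- ===== Notes on version B (the rewrite author's own statement) =====
-- stated objective: faster
-- what changed: Replaced the r*c dynamic-programming table fill by the closed form: the DP solves to dp[i][j] = i+j+1, so B builds only the first dp row and returns (r-1) plus its last entry (= r+c-1), raising as A does on empty/zero-width grids.
import Mathlib
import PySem

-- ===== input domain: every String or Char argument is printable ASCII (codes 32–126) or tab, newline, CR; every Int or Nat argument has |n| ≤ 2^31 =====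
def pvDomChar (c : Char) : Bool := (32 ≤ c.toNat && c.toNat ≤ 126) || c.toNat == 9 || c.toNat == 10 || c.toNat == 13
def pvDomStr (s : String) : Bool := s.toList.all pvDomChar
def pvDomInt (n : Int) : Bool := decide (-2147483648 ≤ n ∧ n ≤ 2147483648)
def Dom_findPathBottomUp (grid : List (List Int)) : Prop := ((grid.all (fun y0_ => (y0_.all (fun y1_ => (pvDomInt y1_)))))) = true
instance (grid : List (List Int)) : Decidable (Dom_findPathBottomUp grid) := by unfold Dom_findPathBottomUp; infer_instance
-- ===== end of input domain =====

-- B replaces A's r*c DP table fill by the closed form (builds only the first dp row and adds r-1): faster.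


-- ===== PORT A =====
-- A-side helpers: 2-d table read/write with Nat indices (all indices A uses are
-- nonnegative and, under Pre_, in range; out of range we read a default, never hit there).
def pvGet2 (dp : List (List Int)) (i j : Nat) : Int := (dp.getD i []).getD j 0

def pvSet2 (dp : List (List Int)) (i j : Nat) (v : Int) : List (List Int) :=
  dp.set i ((dp.getD i []).set j v)

-- dp after `dp = [[0]*c for i in range(r)]` and the two initialization loops
def pvInitTable (r c : Nat) : List (List Int) :=
  let dp0 := (List.range r).map (fun _ => List.replicate c (0 : Int))
  let dp1 := (List.range r).foldl (fun dp i => pvSet2 dp i 0 ((i : Int) + 1)) dp0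
  (List.range c).foldl (fun dp j => pvSet2 dp 0 j ((j : Int) + 1)) dp1

-- the inner loop `for j in range(1, c): dp[i][j] = 1 + min(dp[i-1][j], dp[i][j-1])`
def pvInner (i : Nat) (m : Nat) (dp : List (List Int)) : List (List Int) :=
  (List.range' 1 m).foldl
    (fun dp j => pvSet2 dp i j (1 + min (pvGet2 dp (i - 1) j) (pvGet2 dp i (j - 1)))) dp

-- the outer loop `for i in range(1, r): …`
def pvFill (r c : Nat) (dp : List (List Int)) : List (List Int) :=
  (List.range' 1 (r - 1)).foldl (fun dp i => pvInner i (c - 1) dp) dp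

def findPathBottomUp (grid : List (List Int)) : Int :=
  let r := grid.length
  let c := (grid.getD 0 []).length
  pvGet2 (pvFill r c (pvInitTable r c)) (r - 1) (c - 1)

-- ===== PORT B =====
-- B: first_row = [j+1 for j in range(c)]; return (r-1) + first_row[-1]
-- (first_row[-1] via PySem.List.pyGet?; under Pre_ it is some, matching Python).
def findPathBottomUp_alt (grid : List (List Int)) : Int :=
  let r := grid.length
  let c := (grid.getD 0 []).length
  let firstRow := (List.range c).map (fun j => (j : Int) + 1)
  ((r : Int) - 1) + (PySem.List.pyGet? firstRow (-1)).getD 0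

-- ===== PRECONDITION & SPEC =====
-- Pre_ excludes exactly the inputs where Python A raises IndexError (B raises there too):
-- the empty grid (grid[0]) and a grid whose first row is empty (dp[i][0] / first_row[-1]).
def Pre_findPathBottomUp (grid : List (List Int)) : Prop :=
  grid ≠ [] ∧ grid.getD 0 [] ≠ []
instance (grid : List (List Int)) : Decidable (Pre_findPathBottomUp grid) := by
  unfold Pre_findPathBottomUp; infer_instance
def pvWitness_findPathBottomUp : List (List Int) := [[5, 2], [7, 1]]

def Spec_findPathBottomUp (grid : List (List Int)) (out : Int) : Prop := out = findPathBottomUp_alt grid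
instance (grid : List (List Int)) (out : Int) : Decidable (Spec_findPathBottomUp grid out) := by unfold Spec_findPathBottomUp; infer_instance

-- ===== CLAIM (what is proved, stated in full; the proofs are below) =====
def Claim_equal_findPathBottomUp : Prop := ∀ (grid : List (List Int)), Dom_findPathBottomUp grid → Pre_findPathBottomUp grid → Spec_findPathBottomUp grid (findPathBottomUp grid)

-- ===== LEMMAS AND PROOFS =====

theorem pvGetD_set {α : Type} (d : α) : ∀ (l : List α) (j k : Nat) (v : α),
    (l.set j v).getD k d = if k = j ∧ j < l.length then v else l.getD k d
  | [], j, k, v => by simp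
  | a :: l, 0, 0, v => by simp
  | a :: l, 0, k + 1, v => by simp
  | a :: l, j + 1, 0, v => by simp
  | a :: l, j + 1, k + 1, v => by
      have h : (k + 1 = j + 1 ∧ j + 1 < (a :: l).length) ↔ (k = j ∧ j < l.length) := by
        simp only [List.length_cons]; omega
      simp only [List.set_cons_succ, List.getD_cons_succ]
      rw [pvGetD_set d l j k v, if_congr h rfl rfl]

theorem pvGetD_replicate {α : Type} (d x : α) : ∀ (n k : Nat),
    (List.replicate n x).getD k d = if k < n then x else d
  | 0, k => by simp
  | n + 1, 0 => by simp [List.replicate_succ]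
  | n + 1, k + 1 => by
      have h : (k + 1 < n + 1) ↔ (k < n) := by omega
      simp only [List.replicate_succ, List.getD_cons_succ]
      rw [pvGetD_replicate d x n k, if_congr h rfl rfl]

theorem pvRangeMapConst {α : Type} (x : α) (r : Nat) :
    (List.range r).map (fun _ => x) = List.replicate r x := by
  induction r with
  | zero => simp
  | succ n ih => rw [List.range_succ, List.map_append, ih]; simp [List.replicate_succ']

theorem pvSet2_row (dp : List (List Int)) (i j k : Nat) (v : Int) :
    (pvSet2 dp i j v).getD k [] =
      if k = i ∧ i < dp.length then (dp.getD i []).set j v else dp.getD k [] := by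
  unfold pvSet2; rw [pvGetD_set]

theorem pvSet2_length (dp : List (List Int)) (i j : Nat) (v : Int) :
    (pvSet2 dp i j v).length = dp.length := by
  simp [pvSet2]

-- the column-0 initialization loop
theorem pvColInit : ∀ (n : Nat) (dp : List (List Int)),
    ((List.range n).foldl (fun dp i => pvSet2 dp i 0 ((i : Int) + 1)) dp).length = dp.length ∧
    ∀ k, ((List.range n).foldl (fun dp i => pvSet2 dp i 0 ((i : Int) + 1)) dp).getD k [] =
      if k < n ∧ k < dp.length then (dp.getD k []).set 0 ((k : Int) + 1) else dp.getD k [] := by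
  intro n dp
  induction n with
  | zero => simp
  | succ m ih =>
    obtain ⟨hlen, hrow⟩ := ih
    rw [List.range_succ, List.foldl_append]
    refine ⟨by rw [List.foldl_cons, List.foldl_nil, pvSet2_length, hlen], ?_⟩
    intro k
    rw [List.foldl_cons, List.foldl_nil, pvSet2_row, hlen]
    by_cases hk : k = m
    · subst hk
      by_cases hm2 : k < dp.length
      · rw [if_pos ⟨rfl, hm2⟩, if_pos ⟨by omega, hm2⟩, hrow, if_neg (by omega)]
      · rw [if_neg (by tauto), hrow, if_neg (by omega), if_neg (by tauto)]
    · rw [if_neg (by tauto), hrow]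
      have hiff : (k < m ∧ k < dp.length) ↔ (k < m + 1 ∧ k < dp.length) := by
        constructor <;> rintro ⟨h1, h2⟩ <;> exact ⟨by omega, h2⟩
      rw [if_congr hiff rfl rfl]

-- the row-0 initialization loop
theorem pvRowInit : ∀ (m : Nat) (dp : List (List Int)),
    ((List.range m).foldl (fun dp j => pvSet2 dp 0 j ((j : Int) + 1)) dp).length = dp.length ∧
    (∀ k, k ≠ 0 → ((List.range m).foldl (fun dp j => pvSet2 dp 0 j ((j : Int) + 1)) dp).getD k [] = dp.getD k []) ∧
    (((List.range m).foldl (fun dp j => pvSet2 dp 0 j ((j : Int) + 1)) dp).getD 0 []).length = (dp.getD 0 []).length ∧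
    ∀ j, (((List.range m).foldl (fun dp j => pvSet2 dp 0 j ((j : Int) + 1)) dp).getD 0 []).getD j 0 =
      if j < m ∧ j < (dp.getD 0 []).length then (j : Int) + 1 else (dp.getD 0 []).getD j 0 := by
  intro m dp
  induction m with
  | zero => simp
  | succ m ih =>
    obtain ⟨hlen, hother, hrl, hval⟩ := ih
    rw [List.range_succ, List.foldl_append]
    set F := (List.range m).foldl (fun dp j => pvSet2 dp 0 j ((j : Int) + 1)) dp with hF
    simp only [List.foldl_cons, List.foldl_nil]
    by_cases hd : 0 < dp.length
    · have h0F : 0 < F.length := by omega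
      have hrow0 : (pvSet2 F 0 m ((m : Int) + 1)).getD 0 [] = (F.getD 0 []).set m ((m : Int) + 1) := by
        rw [pvSet2_row, if_pos ⟨rfl, h0F⟩]
      refine ⟨by rw [pvSet2_length, hlen], ?_, ?_, ?_⟩
      · intro k hk; rw [pvSet2_row, if_neg (by tauto), hother k hk]
      · rw [hrow0, List.length_set]; exact hrl
      · intro j
        rw [hrow0, pvGetD_set, hrl]
        by_cases hj : j = m
        · subst hj
          by_cases hm2 : j < (dp.getD 0 []).length
          · rw [if_pos ⟨rfl, hm2⟩, if_pos ⟨by omega, hm2⟩]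
          · rw [if_neg (by tauto), hval, if_neg (by tauto), if_neg (by tauto)]
        · rw [if_neg (by tauto), hval]
          have hiff : (j < m ∧ j < (dp.getD 0 []).length) ↔ (j < m + 1 ∧ j < (dp.getD 0 []).length) := by
            constructor <;> rintro ⟨h1, h2⟩ <;> exact ⟨by omega, h2⟩
          rw [if_congr hiff rfl rfl]
    · have hF0 : F.length = 0 := by omega
      have hnoop : pvSet2 F 0 m ((m : Int) + 1) = F := by
        unfold pvSet2; rw [List.set_eq_of_length_le (by omega)]
      rw [hnoop]
      have hd' : (dp.getD 0 []).length = 0 := by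
        cases dp with
        | nil => simp
        | cons a l => simp at hd
      refine ⟨hlen, hother, hrl, ?_⟩
      intro j
      rw [hval, if_neg (by omega), if_neg (by omega)]

-- the initialized table satisfies all four facts A's fill loop relies on
theorem pvInitTable_ok (r c : Nat) (hr : 0 < r) (hc : 0 < c) :
    (pvInitTable r c).length = r ∧
    (∀ k, k < r → ((pvInitTable r c).getD k []).length = c) ∧
    (∀ j, j < c → pvGet2 (pvInitTable r c) 0 j = (j : Int) + 1) ∧
    (∀ k, k < r → pvGet2 (pvInitTable r c) k 0 = (k : Int) + 1) := by
  unfold pvInitTable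
  rw [pvRangeMapConst]
  set dp0 := List.replicate r (List.replicate c (0 : Int)) with hdp0
  obtain ⟨h1len, h1row⟩ := pvColInit r dp0
  set dp1 := (List.range r).foldl (fun dp i => pvSet2 dp i 0 ((i : Int) + 1)) dp0 with hdp1
  obtain ⟨h2len, h2other, h2rl, h2val⟩ := pvRowInit c dp1
  have hdp0len : dp0.length = r := by simp [hdp0]
  have hdp0row : ∀ k, k < r → dp0.getD k [] = List.replicate c (0 : Int) := by
    intro k hk; rw [hdp0, pvGetD_replicate]; simp [hk]
  have h1rowlt : ∀ k, k < r → dp1.getD k [] = (List.replicate c (0 : Int)).set 0 ((k : Int) + 1) := by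
    intro k hk
    rw [h1row k, hdp0len, if_pos ⟨hk, hk⟩, hdp0row k hk]
  have h1rl : ∀ k, k < r → (dp1.getD k []).length = c := by
    intro k hk; rw [h1rowlt k hk]; simp
  refine ⟨by rw [h2len, h1len, hdp0len], ?_, ?_, ?_⟩
  · intro k hk
    by_cases hk0 : k = 0
    · subst hk0; rw [h2rl, h1rl 0 hr]
    · rw [h2other k hk0, h1rl k hk]
  · intro j hj
    unfold pvGet2
    rw [h2val, h1rl 0 hr, if_pos ⟨hj, hj⟩]
  · intro k hk
    by_cases hk0 : k = 0
    · subst hk0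
      unfold pvGet2
      rw [h2val, h1rl 0 hr, if_pos ⟨hc, hc⟩]
    · unfold pvGet2
      rw [h2other k hk0, h1rowlt k hk, pvGetD_set]
      simp [hc]

-- the inner loop fills row i with dp[i][j] = i+j+1 and touches nothing else
theorem pvInner_ok (c i : Nat) (dp : List (List Int)) (hi : i < dp.length) (hi1 : 1 ≤ i)
    (hrowlen : (dp.getD i []).length = c)
    (habove : ∀ j, j < c → pvGet2 dp (i - 1) j = (i : Int) + (j : Int))
    (hcol0 : pvGet2 dp i 0 = (i : Int) + 1) :
    ∀ n, n < c →
      (pvInner i n dp).length = dp.length ∧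
      (∀ k, k ≠ i → (pvInner i n dp).getD k [] = dp.getD k []) ∧
      ((pvInner i n dp).getD i []).length = c ∧
      (∀ j, j ≤ n → pvGet2 (pvInner i n dp) i j = (i : Int) + (j : Int) + 1) := by
  intro n
  induction n with
  | zero =>
    intro _
    refine ⟨rfl, fun _ _ => rfl, hrowlen, ?_⟩
    intro j hj
    have hj0 : j = 0 := by omega
    subst hj0
    have h0 : pvInner i 0 dp = dp := rfl
    rw [h0, hcol0]; norm_num
  | succ m ih =>
    intro hm
    obtain ⟨hlen, hother, hrl, hval⟩ := ih (by omega)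
    have hstep : pvInner i (m + 1) dp =
        pvSet2 (pvInner i m dp) i (1 + m)
          (1 + min (pvGet2 (pvInner i m dp) (i - 1) (1 + m)) (pvGet2 (pvInner i m dp) i (1 + m - 1))) := by
      have hcat : List.range' 1 (m + 1) = List.range' 1 m ++ [1 + m] := by
        simp [List.range'_concat]
      unfold pvInner
      rw [hcat, List.foldl_append, List.foldl_cons, List.foldl_nil]
    set F := pvInner i m dp with hFdef
    have hup : pvGet2 F (i - 1) (1 + m) = (i : Int) + (m : Int) + 1 := by
      unfold pvGet2
      have hne : i - 1 ≠ i := by omega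
      rw [hother (i - 1) hne]
      have := habove (1 + m) (by omega)
      unfold pvGet2 at this
      rw [this]; push_cast; ring
    have hleft : pvGet2 F i (1 + m - 1) = (i : Int) + (m : Int) + 1 := by
      have : 1 + m - 1 = m := by omega
      rw [this]; exact hval m (le_refl m)
    have hv : (1 + min (pvGet2 F (i - 1) (1 + m)) (pvGet2 F i (1 + m - 1)))
        = (i : Int) + (m : Int) + 2 := by
      rw [hup, hleft, min_self]; ring
    rw [hstep, hv]
    have hiF : i < F.length := by omega
    have hrowF : (pvSet2 F i (1 + m) ((i : Int) + (m : Int) + 2)).getD i []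
        = (F.getD i []).set (1 + m) ((i : Int) + (m : Int) + 2) := by
      rw [pvSet2_row, if_pos ⟨rfl, hiF⟩]
    refine ⟨by rw [pvSet2_length, hlen], ?_, ?_, ?_⟩
    · intro k hk
      rw [pvSet2_row, if_neg (by tauto), hother k hk]
    · rw [hrowF, List.length_set]; exact hrl
    · intro j hj
      unfold pvGet2
      rw [hrowF, pvGetD_set]
      by_cases hjm : j = 1 + m
      · rw [if_pos ⟨hjm, by omega⟩]
        subst hjm; push_cast; ring
      · rw [if_neg (by tauto)]
        have := hval j (by omega)
        unfold pvGet2 at this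
        rw [this]

-- the outer loop makes every row ≤ n correct
theorem pvFillAux_ok (r c : Nat) (hc : 0 < c) (dp : List (List Int))
    (hlen : dp.length = r) (hrowlen : ∀ k, k < r → (dp.getD k []).length = c)
    (hrow0 : ∀ j, j < c → pvGet2 dp 0 j = (j : Int) + 1)
    (hcol0 : ∀ k, k < r → pvGet2 dp k 0 = (k : Int) + 1) :
    ∀ n, n < r →
      ((List.range' 1 n).foldl (fun dp i => pvInner i (c - 1) dp) dp).length = r ∧
      (∀ k, n < k → ((List.range' 1 n).foldl (fun dp i => pvInner i (c - 1) dp) dp).getD k [] = dp.getD k []) ∧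
      (∀ k, k < r → (((List.range' 1 n).foldl (fun dp i => pvInner i (c - 1) dp) dp).getD k []).length = c) ∧
      (∀ k, k ≤ n → ∀ j, j < c →
        pvGet2 ((List.range' 1 n).foldl (fun dp i => pvInner i (c - 1) dp) dp) k j = (k : Int) + (j : Int) + 1) := by
  intro n
  induction n with
  | zero =>
    intro _
    refine ⟨hlen, fun _ _ => rfl, hrowlen, ?_⟩
    intro k hk j hj
    have hk0 : k = 0 := by omega
    subst hk0
    have h0 : (List.range' 1 0).foldl (fun dp i => pvInner i (c - 1) dp) dp = dp := rfl
    rw [h0, hrow0 j hj]; norm_num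
  | succ m ih =>
    intro hm
    obtain ⟨hGlen, hGother, hGrl, hGval⟩ := ih (by omega)
    set G := (List.range' 1 m).foldl (fun dp i => pvInner i (c - 1) dp) dp with hGdef
    have hstep : (List.range' 1 (m + 1)).foldl (fun dp i => pvInner i (c - 1) dp) dp
        = pvInner (1 + m) (c - 1) G := by
      have hcat : List.range' 1 (m + 1) = List.range' 1 m ++ [1 + m] := by
        simp [List.range'_concat]
      rw [hcat, List.foldl_append, List.foldl_cons, List.foldl_nil]
    have h1m : 1 + m = m + 1 := by omega
    have hinner := pvInner_ok c (1 + m) G (by omega) (by omega)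
      (by rw [hGrl (1 + m) (by omega)])
      (by
        intro j hj
        have hsub : 1 + m - 1 = m := by omega
        rw [hsub]
        have h := hGval m (le_refl m) j hj
        unfold pvGet2 at h ⊢
        rw [h]; push_cast; ring)
      (by
        unfold pvGet2
        rw [hGother (1 + m) (by omega)]
        have := hcol0 (1 + m) (by omega)
        unfold pvGet2 at this
        rw [this])
      (c - 1) (by omega)
    obtain ⟨hIlen, hIother, hIrl, hIval⟩ := hinner
    rw [hstep]
    refine ⟨by rw [hIlen, hGlen], ?_, ?_, ?_⟩
    · intro k hk
      rw [hIother k (by omega), hGother k (by omega)]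
    · intro k hk
      by_cases hkm : k = 1 + m
      · subst hkm; exact hIrl
      · rw [hIother k hkm, hGrl k hk]
    · intro k hk j hj
      by_cases hkm : k = 1 + m
      · subst hkm
        have := hIval j (by omega)
        rw [this]
      · unfold pvGet2
        rw [hIother k hkm]
        have := hGval k (by omega) j hj
        unfold pvGet2 at this
        rw [this]

-- B's first_row[-1]: the last element of [j+1 for j in range(c)] is c, for c > 0
theorem pvFirstRowLast (c : Nat) (hc : 0 < c) :
    PySem.List.pyGet? ((List.range c).map (fun j => (j : Int) + 1)) (-1) = some ((c : Int)) := by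
  obtain ⟨m, rfl⟩ : ∃ m, c = m + 1 := ⟨c - 1, by omega⟩
  rw [List.range_succ]
  simp [PySem.List.pyGet?_neg_one_append_singleton]

-- ===== VERDICT (by name: the statement is the Claim_ definition above) =====
theorem findPathBottomUp_spec : Claim_equal_findPathBottomUp := by
  intro grid _ hpre
  obtain ⟨hg, hrow⟩ := hpre
  have hr : 0 < grid.length := List.length_pos_iff.mpr hg
  have hc : 0 < (grid.getD 0 []).length := List.length_pos_iff.mpr hrow
  set r := grid.length with hrdef
  set c := (grid.getD 0 []).length with hcdef
  obtain ⟨h1, h2, h3, h4⟩ := pvInitTable_ok r c hr hc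
  have hA := (pvFillAux_ok r c hc (pvInitTable r c) h1 h2 h3 h4 (r - 1) (by omega)).2.2.2
    (r - 1) (le_refl _) (c - 1) (by omega)
  unfold Spec_findPathBottomUp findPathBottomUp findPathBottomUp_alt
  show pvGet2 (pvFill r c (pvInitTable r c)) (r - 1) (c - 1)
      = ((r : Int) - 1) + (PySem.List.pyGet? ((List.range c).map (fun j => (j : Int) + 1)) (-1)).getD 0
  unfold pvFill
  rw [hA, pvFirstRowLast c hc]
  simp only [Option.getD_some]
  omega
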